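-- pv_equiv track=rewrite | github.com/Hermione28/Data-Structure | GeeksForGeeks/Problem Of The Solution/POTD 2026/January 2026/Day 23:Maximum People Visible in a Line .py | maxPeople
-- ===== SOURCE A (Python) =====
-- def maxPeople(arr):
--     n = len(arr)
--     prevGE = [-1] * n
--     nextGE = [n] * n
--     stack = []
--
--     # Previous Greater or Equal
--     for i in range(n):
--         while stack and arr[stack[-1]] < arr[i]:
--             stack.pop()
--         prevGE[i] = stack[-1] if stack else -1
--         stack.append(i)
--
--     stack.clear()
--
--     # Next Greater or Equal
--     for i in range(n - 1, -1, -1):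
--         while stack and arr[stack[-1]] < arr[i]:
--             stack.pop()
--         nextGE[i] = stack[-1] if stack else n
--         stack.append(i)
--
--     ans = 0
--     for i in range(n):
--         left = i - prevGE[i] - 1
--         right = nextGE[i] - i - 1
--         ans = max(ans, left + right + 1)
--
--     return ans
-- ===== SOURCE B (Python) =====
-- def maxPeople(arr):
--     n = len(arr)
--     ans = 0
--     for i in range(n):
--         left = 0
--         j = i - 1
--         while j >= 0 and arr[j] < arr[i]:
--             left += 1
--             j -= 1
--         right = 0
--         j = i + 1
--         while j < n and arr[j] < arr[i]:
--             right += 1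
--             j += 1
--         ans = max(ans, left + right + 1)
--     return ans
-- ===== Notes on version B (the rewrite author's own statement) =====
-- stated objective: simpler
-- what changed: Replaced the two monotonic-stack passes that precompute prevGE/nextGE arrays by a direct per-index outward expansion (count strictly smaller neighbours left and right), removing the stacks and auxiliary arrays entirely.
import Mathlib
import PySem

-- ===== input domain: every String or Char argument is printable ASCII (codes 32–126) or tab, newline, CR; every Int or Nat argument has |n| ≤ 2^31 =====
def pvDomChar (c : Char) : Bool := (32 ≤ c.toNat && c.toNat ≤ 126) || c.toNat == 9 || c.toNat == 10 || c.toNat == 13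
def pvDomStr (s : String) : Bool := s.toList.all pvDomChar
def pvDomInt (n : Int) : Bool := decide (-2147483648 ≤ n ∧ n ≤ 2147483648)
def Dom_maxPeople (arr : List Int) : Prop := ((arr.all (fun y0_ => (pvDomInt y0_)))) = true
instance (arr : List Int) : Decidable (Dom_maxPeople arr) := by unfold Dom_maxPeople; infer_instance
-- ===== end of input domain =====

-- B replaces A's two monotonic-stack passes (prevGE/nextGE arrays) by a direct
-- outward expansion around each index (objective: simpler); A = B on all inputs.

-- ===== PORT A =====
-- loop body of A's first pass (pop-while, record prevGE[i] by appending, push i);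
-- the stack is kept top-first, so Python's stack[-1] is the head
def pvStep1 (g : Nat → Int) (st : List Int × List Nat) (i : Nat) : List Int × List Nat :=
  let s := st.2.dropWhile (fun j => g j < g i)
  (st.1 ++ [match s with | [] => (-1 : Int) | j :: _ => (j : Int)], i :: s)

-- loop body of A's second pass (i runs n-1 … 0, so nextGE is built by consing)
def pvStep2 (g : Nat → Int) (n : Nat) (st : List Int × List Nat) (i : Nat) : List Int × List Nat :=
  let s := st.2.dropWhile (fun j => g j < g i)
  ((match s with | [] => (n : Int) | j :: _ => (j : Int)) :: st.1, i :: s)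

def maxPeople (arr : List Int) : Int :=
  let n := arr.length
  let g := fun (j : Nat) => arr.getD j 0     -- arr[j]; every lookup A makes is in range
  let prevGE := ((List.range n).foldl (pvStep1 g) ([], [])).1
  let nextGE := ((List.range n).reverse.foldl (pvStep2 g n) ([], [])).1
  (List.range n).foldl (fun (ans : Int) (i : Nat) =>
    let left := (i : Int) - prevGE.getD i 0 - 1
    let right := nextGE.getD i 0 - (i : Int) - 1
    max ans (left + right + 1)) 0

-- ===== PORT B =====
-- B's left walk: while j >= 0 and arr[j] < v (j going down; argument j+1 means "index j is next to test")
def pvCountL (arr : List Int) (v : Int) : Nat → Nat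
  | 0 => 0
  | j + 1 => if arr.getD j 0 < v then pvCountL arr v j + 1 else 0

-- B's right walk: while j < n and arr[j] < v (j going up)
def pvCountR (arr : List Int) (v : Int) (n : Nat) (j : Nat) : Nat :=
  if j < n then (if arr.getD j 0 < v then pvCountR arr v n (j + 1) + 1 else 0) else 0
termination_by n - j

def maxPeople_alt (arr : List Int) : Int :=
  let n := arr.length
  (List.range n).foldl (fun (ans : Int) (i : Nat) =>
    let left := pvCountL arr (arr.getD i 0) i
    let right := pvCountR arr (arr.getD i 0) n (i + 1)
    max ans ((left : Int) + (right : Int) + 1)) 0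

-- ===== PRECONDITION & SPEC =====
def Spec_maxPeople (arr : List Int) (out : Int) : Prop := out = maxPeople_alt arr
instance (arr : List Int) (out : Int) : Decidable (Spec_maxPeople arr out) := by unfold Spec_maxPeople; infer_instance

-- ===== CLAIM (what is proved, stated in full; the proofs are below) =====
def Claim_equal_maxPeople : Prop := ∀ (arr : List Int), Dom_maxPeople arr → Spec_maxPeople arr (maxPeople arr)

-- ===== LEMMAS AND PROOFS =====

-- the nearest j < i with v ≤ g j (-1 if none): closed form of A's prevGE and of B's left walk
def pvPrevIdx (g : Nat → Int) (v : Int) : Nat → Int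
  | 0 => -1
  | j + 1 => if v ≤ g j then (j : Int) else pvPrevIdx g v j

-- the nearest k with j ≤ k < n and v ≤ g k (n if none): closed form of A's nextGE and of B's right walk
def pvNextIdx (g : Nat → Int) (v : Int) (n : Nat) (j : Nat) : Int :=
  if j < n then (if v ≤ g j then (j : Int) else pvNextIdx g v n (j + 1)) else (n : Int)
termination_by n - j

-- state of A's first pass after the indices < k have been processed
def pvS1 (g : Nat → Int) (k : Nat) : List Int × List Nat :=
  (List.range k).foldl (pvStep1 g) ([], [])

-- "index j is still on the stack after the indices < k have been processed"
def pvQ (g : Nat → Int) (k j : Nat) : Prop := j < k ∧ ∀ t, j < t → t < k → g t ≤ g j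

-- B's left count in terms of pvPrevIdx
theorem pvCountL_eq (arr : List Int) (v : Int) (j : Nat) :
    (pvCountL arr v j : Int) = (j : Int) - pvPrevIdx (fun t => arr.getD t 0) v j - 1 := by
  induction j with
  | zero => simp [pvCountL, pvPrevIdx]
  | succ j ih =>
      simp only [pvCountL, pvPrevIdx]
      split_ifs with h1 h2 h2 <;> push_cast <;> omega

-- B's right count in terms of pvNextIdx
theorem pvCountR_eq (arr : List Int) (v : Int) (n : Nat) (j : Nat) (hj : j ≤ n) :
    (pvCountR arr v n j : Int) = pvNextIdx (fun t => arr.getD t 0) v n j - (j : Int) := by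
  by_cases h : j < n
  · have ih := pvCountR_eq arr v n (j + 1) (by omega)
    rw [pvCountR, pvNextIdx]
    simp only [h, if_true]
    split_ifs with h1 h2 h2 <;> push_cast <;> omega
  · rw [pvCountR, pvNextIdx]
    simp only [h, if_false]
    omega
termination_by n - j

-- characterisation of pvPrevIdx
theorem pvPrevIdx_spec (g : Nat → Int) (v : Int) (i : Nat) :
    (pvPrevIdx g v i = -1 ∧ ∀ j, j < i → g j < v) ∨
    (∃ j : Nat, pvPrevIdx g v i = (j : Int) ∧ j < i ∧ v ≤ g j ∧ ∀ t, j < t → t < i → g t < v) := by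
  induction i with
  | zero => left; exact ⟨rfl, by omega⟩
  | succ i ih =>
      by_cases h : v ≤ g i
      · right
        exact ⟨i, by simp [pvPrevIdx, h], by omega, h, by omega⟩
      · rcases ih with ⟨h1, h2⟩ | ⟨j, h1, h2, h3, h4⟩
        · left
          refine ⟨by simp [pvPrevIdx, h, h1], ?_⟩
          intro j hj
          rcases Nat.lt_succ_iff_lt_or_eq.mp hj with hj | hj
          · exact h2 j hj
          · subst hj; exact not_le.mp h
        · right
          refine ⟨j, by simp [pvPrevIdx, h, h1], by omega, h3, ?_⟩
          intro t ht1 ht2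
          rcases Nat.lt_succ_iff_lt_or_eq.mp ht2 with ht2 | ht2
          · exact h4 t ht1 ht2
          · subst ht2; exact not_le.mp h

-- pvNextIdx = n when no qualifying index exists
theorem pvNextIdx_none (g : Nat → Int) (v : Int) (n : Nat) (j : Nat)
    (h : ∀ t, j ≤ t → t < n → g t < v) : pvNextIdx g v n j = (n : Int) := by
  by_cases hj : j < n
  · rw [pvNextIdx]
    have := h j le_rfl hj
    simp only [hj, if_true, not_le.mpr this, if_false]
    exact pvNextIdx_none g v n (j + 1) (fun t ht1 ht2 => h t (by omega) ht2)
  · rw [pvNextIdx]; simp [hj]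
termination_by n - j

-- pvNextIdx returns the first qualifying index
theorem pvNextIdx_found (g : Nat → Int) (v : Int) (n : Nat) (j k : Nat)
    (hjk : j ≤ k) (hk : k < n) (hv : v ≤ g k) (hmin : ∀ t, j ≤ t → t < k → g t < v) :
    pvNextIdx g v n j = (k : Int) := by
  rcases Nat.eq_or_lt_of_le hjk with h | h
  · subst h
    rw [pvNextIdx]; simp [hk, hv]
  · rw [pvNextIdx]
    have hjn : j < n := lt_trans h hk
    have := hmin j le_rfl h
    simp only [hjn, if_true, not_le.mpr this, if_false]
    exact pvNextIdx_found g v n (j + 1) k (by omega) hk hv (fun t ht1 ht2 => hmin t (by omega) ht2)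
termination_by n - j

-- on a descending stack with downward non-decreasing values, the pop-while
-- keeps exactly the elements with v ≤ g j
theorem pv_mem_dropWhile_iff (g : Nat → Int) (v : Int) (s : List Nat)
    (hs : s.Pairwise (· > ·)) (hmono : ∀ a b, a ∈ s → b ∈ s → b < a → g a ≤ g b) (j : Nat) :
    j ∈ s.dropWhile (fun j => g j < v) ↔ j ∈ s ∧ v ≤ g j := by
  constructor
  · intro hj
    have hmem : j ∈ s := (List.dropWhile_sublist _).mem hj
    refine ⟨hmem, ?_⟩
    cases hd : s.dropWhile (fun j => g j < v) with
    | nil => rw [hd] at hj; simp at hj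
    | cons h t =>
        have hh : ¬ (g h < v) := by
          have := List.head?_dropWhile_not (fun j => decide (g j < v)) s
          rw [hd] at this
          simpa using this
        rw [hd] at hj
        rcases List.mem_cons.mp hj with hj | hj
        · subst hj; omega
        · have hpair : (h :: t).Pairwise (· > ·) := by
            rw [← hd]; exact hs.sublist (List.dropWhile_sublist _)
          have hgt : h > j := (List.pairwise_cons.mp hpair).1 j hj
          have hmem' : h ∈ s := (List.dropWhile_sublist _).mem (by rw [hd]; simp)
          have := hmono h j hmem' hmem hgt
          omega
  · intro ⟨hmem, hv⟩
    have := List.takeWhile_append_dropWhile (p := fun j => decide (g j < v)) (l := s)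
    rw [← this] at hmem
    rcases List.mem_append.mp hmem with hmem | hmem
    · have := List.mem_takeWhile_imp hmem
      simp at this
      omega
    · exact hmem

theorem pvS1_succ (g : Nat → Int) (k : Nat) :
    pvS1 g (k + 1) = pvStep1 g (pvS1 g k) k := by
  simp [pvS1, List.range_succ]

-- main invariant of A's first pass: the produced prevGE values are pvPrevIdx,
-- the stack is descending and holds exactly the "still visible" indices
theorem pv_stack_inv (g : Nat → Int) (k : Nat) :
    (pvS1 g k).1 = (List.range k).map (fun i => pvPrevIdx g (g i) i) ∧
    (pvS1 g k).2.Pairwise (· > ·) ∧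
    (∀ j, j ∈ (pvS1 g k).2 ↔ pvQ g k j) := by
  induction k with
  | zero =>
      refine ⟨rfl, by simp [pvS1], ?_⟩
      intro j
      simp [pvS1, pvQ]
  | succ k ih =>
      obtain ⟨ih1, ih2, ih3⟩ := ih
      have hmono : ∀ a b, a ∈ (pvS1 g k).2 → b ∈ (pvS1 g k).2 → b < a → g a ≤ g b := by
        intro a b ha hb hba
        have qa := (ih3 a).mp ha
        have qb := (ih3 b).mp hb
        exact qb.2 a hba qa.1
      have hdrop := pv_mem_dropWhile_iff g (g k) (pvS1 g k).2 ih2 hmono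
      have hlt : ∀ j, j ∈ (pvS1 g k).2.dropWhile (fun j => g j < g k) → j < k := by
        intro j hj
        exact (((ih3 j).mp ((hdrop j).mp hj).1)).1
      rw [pvS1_succ]
      refine ⟨?_, ?_, ?_⟩
      · -- the value recorded at index k is pvPrevIdx g (g k) k
        have hval : (match (pvS1 g k).2.dropWhile (fun j => g j < g k) with
            | [] => (-1 : Int) | j :: _ => (j : Int)) = pvPrevIdx g (g k) k := by
          rcases pvPrevIdx_spec g (g k) k with ⟨h1, h2⟩ | ⟨j, h1, h2, h3, h4⟩
          · cases hd : (pvS1 g k).2.dropWhile (fun j => g j < g k) with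
            | nil => simp [h1]
            | cons h t =>
                exfalso
                have hh : h ∈ (pvS1 g k).2.dropWhile (fun j => g j < g k) := by rw [hd]; simp
                obtain ⟨hmem, hge⟩ := (hdrop h).mp hh
                have hk := ((ih3 h).mp hmem).1
                have := h2 h hk
                omega
          · have hjmem : j ∈ (pvS1 g k).2 := by
              refine (ih3 j).mpr ⟨h2, ?_⟩
              intro t ht1 ht2
              have := h4 t ht1 ht2
              omega
            have hjdrop : j ∈ (pvS1 g k).2.dropWhile (fun j => g j < g k) :=
              (hdrop j).mpr ⟨hjmem, h3⟩
            cases hd : (pvS1 g k).2.dropWhile (fun j => g j < g k) with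
            | nil => rw [hd] at hjdrop; simp at hjdrop
            | cons h t =>
                have hh : h ∈ (pvS1 g k).2.dropWhile (fun j => g j < g k) := by rw [hd]; simp
                obtain ⟨hmemh, hgeh⟩ := (hdrop h).mp hh
                have hhk : h < k := ((ih3 h).mp hmemh).1
                rw [hd] at hjdrop
                rcases List.mem_cons.mp hjdrop with hj | hj
                · simp [h1, hj]
                · exfalso
                  have hpair : ((pvS1 g k).2.dropWhile (fun j => g j < g k)).Pairwise (· > ·) :=
                    ih2.sublist (List.dropWhile_sublist _)
                  rw [hd] at hpair
                  have hgt : h > j := (List.pairwise_cons.mp hpair).1 j hj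
                  have := h4 h hgt hhk
                  omega
        simp only [pvStep1, ih1, List.range_succ, List.map_append, List.map_cons, List.map_nil]
        rw [hval]
      · -- the new stack is descending
        simp only [pvStep1]
        rw [List.pairwise_cons]
        exact ⟨fun j hj => hlt j hj, ih2.sublist (List.dropWhile_sublist _)⟩
      · -- membership in the new stack
        intro j
        simp only [pvStep1, List.mem_cons]
        rw [hdrop j]
        constructor
        · rintro (rfl | ⟨hmem, hge⟩)
          · exact ⟨by omega, by omega⟩
          · obtain ⟨hjk, hall⟩ := (ih3 j).mp hmem
            refine ⟨by omega, ?_⟩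
            intro t ht1 ht2
            rcases Nat.lt_succ_iff_lt_or_eq.mp ht2 with ht2 | ht2
            · exact hall t ht1 ht2
            · subst ht2; exact hge
        · rintro ⟨hj, hall⟩
          rcases Nat.lt_succ_iff_lt_or_eq.mp hj with hj | hj
          · right
            refine ⟨(ih3 j).mpr ⟨hj, fun t ht1 ht2 => hall t ht1 (by omega)⟩, hall k hj (by omega)⟩
          · left; exact hj

-- the second pass is the mirror image of the first, run on g ∘ (n-1-·)
theorem pv_pass2_eq (g : Nat → Int) (n : Nat) (k : Nat) (hk : k ≤ n) :
    ((List.map (fun i => n - 1 - i) (List.range k)).foldl (pvStep2 g n) ([], []))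
      = (((pvS1 (fun j => g (n - 1 - j)) k).1.map (fun v : Int => (n : Int) - 1 - v)).reverse,
         (pvS1 (fun j => g (n - 1 - j)) k).2.map (fun j => n - 1 - j)) := by
  induction k with
  | zero => simp [pvS1]
  | succ k ih =>
      have hk' : k ≤ n := by omega
      rw [List.range_succ, List.map_append, List.foldl_append, ih hk', pvS1_succ]
      simp only [List.map_cons, List.map_nil, List.foldl_cons, List.foldl_nil]
      set g' := fun j => g (n - 1 - j) with hg'
      have hpred : (fun (j : Nat) => decide (g j < g (n - 1 - k))) ∘ (fun j => n - 1 - j)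
          = fun j => decide (g' j < g' k) := rfl
      simp only [pvStep2, pvStep1, List.dropWhile_map, hpred]
      have hstack := (pv_stack_inv g' k).2.2
      cases hd : (pvS1 g' k).2.dropWhile (fun j => g' j < g' k) with
      | nil => simp
      | cons h t =>
          have hh : h ∈ (pvS1 g' k).2.dropWhile (fun j => g' j < g' k) := by rw [hd]; simp
          have hmem : h ∈ (pvS1 g' k).2 := (List.dropWhile_sublist _).mem hh
          have hhk : h < k := ((hstack h).mp hmem).1
          have hcast : ((n - 1 - h : Nat) : Int) = (n : Int) - 1 - (h : Int) := by
            have : h ≤ n - 1 := by omega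
            omega
          simp [hcast]

-- (range n).reverse as a map over range n
theorem pv_range_reverse (n : Nat) :
    (List.range n).reverse = (List.range n).map (fun i => n - 1 - i) := by
  apply List.ext_getElem
  · simp
  · intro i h1 h2
    simp only [List.getElem_reverse, List.getElem_map, List.getElem_range, List.length_range]

-- the mirrored pvPrevIdx is pvNextIdx
theorem pv_mirror_idx (g : Nat → Int) (n i : Nat) (hi : i < n) :
    (n : Int) - 1 - pvPrevIdx (fun j => g (n - 1 - j)) (g i) (n - 1 - i)
      = pvNextIdx g (g i) n (i + 1) := by
  set g' := fun j => g (n - 1 - j) with hg'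
  rcases pvPrevIdx_spec g' (g i) (n - 1 - i) with ⟨h1, h2⟩ | ⟨j, h1, h2, h3, h4⟩
  · rw [h1, pvNextIdx_none g (g i) n (i + 1)]
    · omega
    · intro t ht1 ht2
      have := h2 (n - 1 - t) (by omega)
      have heq : n - 1 - (n - 1 - t) = t := by omega
      rw [hg'] at this
      simp only [heq] at this
      exact this
  · rw [h1, pvNextIdx_found g (g i) n (i + 1) (n - 1 - j) (by omega) (by omega) ?hv ?hmin]
    · omega
    case hv =>
      have : g' j = g (n - 1 - j) := rfl
      rw [this] at h3
      exact h3
    case hmin =>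
      intro t ht1 ht2
      have := h4 (n - 1 - t) (by omega) (by omega)
      have heq : n - 1 - (n - 1 - t) = t := by omega
      rw [hg'] at this
      simp only [heq] at this
      exact this

-- the prevGE entry read in A's third loop
theorem pv_prev_entry (g : Nat → Int) (n i : Nat) (hi : i < n) :
    ((List.range n).foldl (pvStep1 g) ([], [])).1.getD i 0 = pvPrevIdx g (g i) i := by
  have h1 := (pv_stack_inv g n).1
  rw [pvS1] at h1
  rw [h1, List.getD_eq_getElem?_getD]
  simp [hi]

-- the nextGE entry read in A's third loop
theorem pv_next_entry (g : Nat → Int) (n i : Nat) (hi : i < n) :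
    ((List.range n).reverse.foldl (pvStep2 g n) ([], [])).1.getD i 0
      = pvNextIdx g (g i) n (i + 1) := by
  rw [pv_range_reverse, pv_pass2_eq g n n le_rfl]
  have h1 := (pv_stack_inv (fun j => g (n - 1 - j)) n).1
  rw [h1]
  rw [List.getD_eq_getElem?_getD]
  have hlen : (((List.range n).map
      (fun i => pvPrevIdx (fun j => g (n - 1 - j)) ((fun j => g (n - 1 - j)) i) i)).map
      (fun v : Int => (n : Int) - 1 - v)).reverse.length = n := by simp
  rw [List.getElem?_eq_getElem (by rw [hlen]; exact hi)]
  simp only [Option.getD_some, List.getElem_reverse, List.getElem_map, List.getElem_range,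
    List.length_map, List.length_range]
  rw [show n - 1 - (n - 1 - i) = i from by omega]
  exact pv_mirror_idx g n i hi

-- ===== VERDICT (by name: the statement is the Claim_ definition above) =====
theorem maxPeople_spec : Claim_equal_maxPeople := by
  intro arr _
  unfold Spec_maxPeople maxPeople maxPeople_alt
  apply PySem.List.foldl_congr_mem
  intro ans i hi
  have hin : i < arr.length := List.mem_range.mp hi
  simp only [pv_prev_entry _ _ _ hin, pv_next_entry _ _ _ hin,
    pvCountL_eq arr (arr.getD i 0) i, pvCountR_eq arr (arr.getD i 0) arr.length (i + 1) (by omega)]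
  congr 1
  push_cast
  ring
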